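-- pv_equiv track=rewrite | github.com/growgraph/pelinker | pelinker/util.py | map_words_to_tokens
-- ===== SOURCE A (Python) =====
-- def map_spans_to_spans_basic(
--     words_boundaries, token_boundaries
-- ) -> dict[tuple[int, int], list[int]]:
--     """
--         given two lists of word bounds and token bounds (in character indexes)
--         [ it is implied that the two lists are sorted ]
--         the list of token boundaries is meant to cover the text (to be complete),
--         on the other hand word boundaries might be not `continuous`
--
--         find the correspondence: (wa, wb) -> [index of token]
--
--         to each word boundary find the indexes of corresponding tokens
--
--     :param words_boundaries:
--     :param token_boundaries:
--     :return: dict with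
--                 key: (char_a, char_b) boundary of group of interest (words)
--                 value: list of corresponding tokens
--     """
--
--     map_ix_jx = {}
--
--     pnt_tokens = 0
--
--     for ix_word in words_boundaries:
--         wa, wb = ix_word
--         map_ix_jx[ix_word] = []
--         while (
--             pnt_tokens < len(token_boundaries) and token_boundaries[pnt_tokens][1] <= wb
--         ):
--             if token_boundaries[pnt_tokens][0] >= wa:
--                 map_ix_jx[ix_word] += [pnt_tokens]
--             pnt_tokens += 1
--     return map_ix_jx
--
-- def map_words_to_tokens(
--     text_token_spans: list[tuple[int, int]], text_word_spans: list[tuple[int, int]]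
-- ) -> tuple[list[tuple[int, int]], list[tuple[int, int]]]:
--     """
--     given text token and word spans,
--
--         words : [...(start_pos_i, end_pos_i)...]
--         tokens : [...(start_pos_i, end_pos_i)...]
--
--     we define work -> token spans, i.e. a mapping of which tokens belong to words groups
--
--     if there is a positive overlap between word i and token j spans,
--         we consider that token j belongs to work i group
--
--     return a list of work -> token bounds : [...(start_token_i, end_token_i)...]
--     and a refreshed
--
--
--     """
--
--     map_ix_jx = map_spans_to_spans_basic(text_word_spans, text_token_spans)
--
--     # sanitize token offsets
--     map_ix_jx = {k: v for k, v in map_ix_jx.items() if v}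
--     text_word_spans = [x for x in map_ix_jx.keys()]
--     token_word_spans = [(y[0], y[-1] + 1) for y in map_ix_jx.values()]
--     return text_word_spans, token_word_spans
-- ===== SOURCE B (Python) =====
-- def map_words_to_tokens(text_token_spans, text_word_spans):
--     # Pass 1 (transposed scan): walk tokens once, advancing a word cursor;
--     # label each token with its owning word (index, span), or None if not included.
--     labels = []
--     i = 0
--     nw = len(text_word_spans)
--     for ta, tb in text_token_spans:
--         while i < nw and tb > text_word_spans[i][1]:
--             i += 1
--         if i == nw:
--             break
--         labels.append((i, text_word_spans[i]) if ta >= text_word_spans[i][0] else None)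
--     # Pass 2: group runs of tokens owned by the same word into index ranges.
--     out_words, out_ranges = [], []
--     prev = -1
--     j = 0
--     for lab in labels:
--         if lab is not None:
--             if lab[0] == prev:
--                 out_ranges[-1] = (out_ranges[-1][0], j + 1)
--             else:
--                 out_words.append(lab[1])
--                 out_ranges.append((j, j + 1))
--                 prev = lab[0]
--         j += 1
--     return out_words, out_ranges
-- ===== Notes on version B (the rewrite author's own statement) =====
-- stated objective: alternative
-- what changed: Transposes the traversal: instead of A's word-driven loop that consumes tokens into per-word index lists in a dict and then filters/projects them, B makes a token-driven pass that labels every token with the word that owns it (advancing a word cursor), then a second grouping pass turns runs of equally-labelled tokens into index ranges.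
-- outside the precondition, e.g. on map_words_to_tokens([(0, 2), (2, 4), (4, 6)], [(0, 4), (0, 4)]): A returns ([], []), B returns ([(0, 4)], [(0, 2)])
import Mathlib
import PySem

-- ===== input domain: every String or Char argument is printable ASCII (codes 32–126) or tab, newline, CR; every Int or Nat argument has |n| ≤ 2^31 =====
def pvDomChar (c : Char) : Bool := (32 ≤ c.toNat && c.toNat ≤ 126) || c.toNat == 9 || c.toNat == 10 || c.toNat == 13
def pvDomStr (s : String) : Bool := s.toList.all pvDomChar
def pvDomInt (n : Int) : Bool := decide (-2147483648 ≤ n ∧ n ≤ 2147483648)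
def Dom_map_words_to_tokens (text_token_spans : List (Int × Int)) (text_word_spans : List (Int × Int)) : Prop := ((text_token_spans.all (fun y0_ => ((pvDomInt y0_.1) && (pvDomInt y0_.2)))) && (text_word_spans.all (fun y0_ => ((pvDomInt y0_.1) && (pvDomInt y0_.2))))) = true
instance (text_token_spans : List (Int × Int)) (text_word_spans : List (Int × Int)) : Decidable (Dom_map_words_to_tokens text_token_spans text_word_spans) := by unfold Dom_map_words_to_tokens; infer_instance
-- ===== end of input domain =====

-- B transposes A's word-driven dict-building scan into a token-driven labelling pass plus a
-- grouping pass over the labels (objective: alternative, same asymptotic cost).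

-- ===== PORT A =====
-- A's inner while loop: 'pnt_tokens < len(token_boundaries)' with a monotonically increasing
-- pointer is carried as the pair (remaining suffix, pnt); the suffix head is token_boundaries[pnt].
def pvAInner (w : Int × Int) :
    List (Int × Int) → Int → PySem.Dict (Int × Int) (List Int) →
    List (Int × Int) × Int × PySem.Dict (Int × Int) (List Int)
  | [], pnt, d => ([], pnt, d)
  | t :: rest, pnt, d =>
    if t.2 ≤ w.2 then
      pvAInner w rest (pnt + 1)
        (if t.1 ≥ w.1 then d.insert w (d.getD w [] ++ [pnt]) else d)
    else (t :: rest, pnt, d)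

def map_spans_to_spans_basic (words_boundaries token_boundaries : List (Int × Int)) :
    PySem.Dict (Int × Int) (List Int) :=
  (words_boundaries.foldl
    (fun st w => pvAInner w st.1 st.2.1 (st.2.2.insert w []))
    (token_boundaries, 0, PySem.Dict.empty)).2.2

def map_words_to_tokens (text_token_spans : List (Int × Int)) (text_word_spans : List (Int × Int)) : (List (Int × Int)) × (List (Int × Int)) :=
  let m := map_spans_to_spans_basic text_word_spans text_token_spans
  -- {k: v for k, v in m.items() if v}, then .keys() and [(y[0], y[-1] + 1) for y in .values()]
  let m2 := m.items.filter (fun kv => !kv.2.isEmpty)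
  (m2.map (fun kv => kv.1),
   m2.map (fun kv => ((PySem.List.pyGet? kv.2 0).getD 0, (PySem.List.pyGet? kv.2 (-1)).getD 0 + 1)))

-- ===== PORT B =====
-- the inner 'while i < nw and tb > words[i][1]: i += 1' over the word suffix, carrying i
def pvAdv (tb : Int) : List (Int × Int) → Int → List (Int × Int) × Int
  | [], i => ([], i)
  | w :: ws, i => if tb > w.2 then pvAdv tb ws (i + 1) else (w :: ws, i)

-- pass 1: one label per token (owning word's (index, span), or none), stopping when words run out
def pvLabs : List (Int × Int) → List (Int × Int) → Int → List (Option (Int × (Int × Int)))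
  | [], _, _ => []
  | t :: ts, ws, i =>
    match pvAdv t.2 ws i with
    | ([], _) => []            -- 'if i == nw: break'
    | (w :: ws', i') =>
      (if t.1 ≥ w.1 then some (i', w) else none) :: pvLabs ts (w :: ws') i'

-- pass 2 body: state (j, prev, out_words, out_ranges); 'out_ranges[-1] = (out_ranges[-1][0], j+1)'
-- is ported via getLast?/dropLast (the list is nonempty whenever that branch runs)
def pvStep (st : Int × Int × List (Int × Int) × List (Int × Int))
    (lab : Option (Int × (Int × Int))) : Int × Int × List (Int × Int) × List (Int × Int) :=
  match lab with
  | none => (st.1 + 1, st.2.1, st.2.2.1, st.2.2.2)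
  | some l =>
    if l.1 == st.2.1 then
      (st.1 + 1, st.2.1, st.2.2.1,
        match st.2.2.2.getLast? with
        | some r => st.2.2.2.dropLast ++ [(r.1, st.1 + 1)]
        | none => st.2.2.2)
    else (st.1 + 1, l.1, st.2.2.1 ++ [l.2], st.2.2.2 ++ [(st.1, st.1 + 1)])

def map_words_to_tokens_alt (text_token_spans : List (Int × Int)) (text_word_spans : List (Int × Int)) : (List (Int × Int)) × (List (Int × Int)) :=
  let labels := pvLabs text_token_spans text_word_spans 0
  let st := labels.foldl pvStep (0, -1, [], [])
  (st.2.2.1, st.2.2.2)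

-- ===== PRECONDITION & SPEC =====
-- Pre_ excludes word-span lists with duplicate entries: there A's dict keyed by the span resets the
-- first occurrence's token list at the second occurrence, an accidental dict-duplicate-key collapse.
def Pre_map_words_to_tokens (text_token_spans : List (Int × Int)) (text_word_spans : List (Int × Int)) : Prop :=
  text_word_spans.Nodup
instance (text_token_spans : List (Int × Int)) (text_word_spans : List (Int × Int)) : Decidable (Pre_map_words_to_tokens text_token_spans text_word_spans) := by unfold Pre_map_words_to_tokens; infer_instance

def pvWitness_map_words_to_tokens : (List (Int × Int)) × (List (Int × Int)) :=
  ([(0, 2), (2, 4), (4, 6)], [(0, 4), (5, 9)])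

def Spec_map_words_to_tokens (text_token_spans : List (Int × Int)) (text_word_spans : List (Int × Int)) (out : (List (Int × Int)) × (List (Int × Int))) : Prop := out = map_words_to_tokens_alt text_token_spans text_word_spans
instance (text_token_spans : List (Int × Int)) (text_word_spans : List (Int × Int)) (out : (List (Int × Int)) × (List (Int × Int))) : Decidable (Spec_map_words_to_tokens text_token_spans text_word_spans out) := by unfold Spec_map_words_to_tokens; infer_instance

-- ===== CLAIM (what is proved, stated in full; the proofs are below) =====
def Claim_equal_map_words_to_tokens : Prop := ∀ (text_token_spans : List (Int × Int)) (text_word_spans : List (Int × Int)), Dom_map_words_to_tokens text_token_spans text_word_spans → Pre_map_words_to_tokens text_token_spans text_word_spans → Spec_map_words_to_tokens text_token_spans text_word_spans (map_words_to_tokens text_token_spans text_word_spans)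

-- ===== LEMMAS AND PROOFS =====

-- pure reference: the token indices one word collects, with the final (suffix, pnt)
def pvColl (w : Int × Int) : List (Int × Int) → Int → List (Int × Int) × Int × List Int
  | [], pnt => ([], pnt, [])
  | t :: rest, pnt =>
    if t.2 ≤ w.2 then
      let r := pvColl w rest (pnt + 1)
      if t.1 ≥ w.1 then (r.1, r.2.1, pnt :: r.2.2) else r
    else (t :: rest, pnt, [])

-- pure reference for the whole pass: each word paired with its collected indices
def pvRef : List (Int × Int) → List (Int × Int) → Int → List ((Int × Int) × List Int)
  | [], _, _ => []
  | w :: ws, rest, pnt =>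
    let c := pvColl w rest pnt
    (w, c.2.2) :: pvRef ws c.1 c.2.1

def pvEnd : List (Int × Int) → List (Int × Int) → Int → List (Int × Int) × Int
  | [], rest, pnt => (rest, pnt)
  | w :: ws, rest, pnt =>
    let c := pvColl w rest pnt
    pvEnd ws c.1 c.2.1

lemma pvAInner_eq (w : Int × Int) :
    ∀ (rest : List (Int × Int)) (pnt : Int) (acc : List Int)
      (d : PySem.Dict (Int × Int) (List Int)),
    pvAInner w rest pnt (d.insert w acc) =
      ((pvColl w rest pnt).1, (pvColl w rest pnt).2.1,
        d.insert w (acc ++ (pvColl w rest pnt).2.2)) := by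
  intro rest
  induction rest with
  | nil => intro pnt acc d; simp [pvAInner, pvColl]
  | cons t rest ih =>
    intro pnt acc d
    simp only [pvAInner, pvColl]
    by_cases h2 : t.2 ≤ w.2
    · simp only [h2, if_true]
      by_cases h1 : t.1 ≥ w.1
      · simp only [h1, if_true]
        rw [PySem.Dict.getD_insert_self, PySem.Dict.insert_insert_self, ih]
        simp
      · simp only [h1, if_false, ih]
    · simp [h2]

lemma foldA_eq :
    ∀ (words rest : List (Int × Int)) (pnt : Int)
      (d : PySem.Dict (Int × Int) (List Int)),
    words.Nodup → (∀ w ∈ words, d.contains w = false) →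
    (words.foldl (fun st w => pvAInner w st.1 st.2.1 (st.2.2.insert w []))
        (rest, pnt, d)).1 = (pvEnd words rest pnt).1 ∧
    (words.foldl (fun st w => pvAInner w st.1 st.2.1 (st.2.2.insert w []))
        (rest, pnt, d)).2.1 = (pvEnd words rest pnt).2 ∧
    (words.foldl (fun st w => pvAInner w st.1 st.2.1 (st.2.2.insert w []))
        (rest, pnt, d)).2.2.items = d.items ++ pvRef words rest pnt := by
  intro words
  induction words with
  | nil => intro rest pnt d _ _; simp [pvEnd, pvRef]
  | cons w ws ih =>
    intro rest pnt d hnd hfresh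
    have hw : d.contains w = false := hfresh w (List.mem_cons_self ..)
    have hnotmem : w ∉ ws := (List.nodup_cons.mp hnd).1
    simp only [List.foldl_cons]
    rw [pvAInner_eq w rest pnt [] d]
    simp only [List.nil_append]
    have hfresh' : ∀ w' ∈ ws, (d.insert w (pvColl w rest pnt).2.2).contains w' = false := by
      intro w' hw'
      rw [PySem.Dict.contains_insert]
      have hne : w' ≠ w := by rintro rfl; exact hnotmem hw'
      simp [hne, hfresh w' (List.mem_cons_of_mem _ hw')]
    have := ih (pvColl w rest pnt).1 (pvColl w rest pnt).2.1
        (d.insert w (pvColl w rest pnt).2.2) (List.nodup_cons.mp hnd).2 hfresh'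
    refine ⟨?_, ?_, ?_⟩
    · rw [this.1]; simp [pvEnd]
    · rw [this.2.1]; simp [pvEnd]
    · rw [this.2.2, PySem.Dict.items_insert, hw]
      simp [pvRef]

def pvOutPair (kv : (Int × Int) × List Int) : Int × Int :=
  (kv.2.head?.getD 0, kv.2.getLast?.getD 0 + 1)

lemma pyGet?_zero_eq_head? (v : List Int) : PySem.List.pyGet? v 0 = v.head? := by
  cases v <;> simp [pysem]

-- ===== B-side lemmas =====

-- pvColl, with the label each consumed token receives
def pvCollL (w : Int × Int) (i : Int) :
    List (Int × Int) → Int → List (Int × Int) × Int × List (Option (Int × (Int × Int)))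
  | [], pnt => ([], pnt, [])
  | t :: rest, pnt =>
    if t.2 ≤ w.2 then
      let r := pvCollL w i rest (pnt + 1)
      (r.1, r.2.1, (if t.1 ≥ w.1 then some (i, w) else none) :: r.2.2)
    else (t :: rest, pnt, [])

lemma labs_nil : ∀ (rest : List (Int × Int)) (i : Int), pvLabs rest [] i = [] := by
  intro rest i; cases rest <;> simp [pvLabs, pvAdv]

-- split off the first word's labels
lemma labs_split (w : Int × Int) :
    ∀ (rest : List (Int × Int)) (ws : List (Int × Int)) (i pnt : Int),
    pvLabs rest (w :: ws) i =
      (pvCollL w i rest pnt).2.2 ++ pvLabs (pvColl w rest pnt).1 ws (i + 1) := by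
  intro rest
  induction rest with
  | nil => intro ws i pnt; simp [pvLabs, pvCollL, pvColl]
  | cons t ts ih =>
    intro ws i pnt
    by_cases h2 : t.2 ≤ w.2
    · have hadv : pvAdv t.2 (w :: ws) i = (w :: ws, i) := by
        simp [pvAdv, not_lt.mpr h2]
      simp only [pvLabs, hadv, pvCollL, pvColl, h2, if_true]
      rw [ih ws i (pnt + 1)]
      by_cases h1 : t.1 ≥ w.1 <;> simp [h1]
    · have hgt : t.2 > w.2 := lt_of_not_ge h2
      have hadv : pvAdv t.2 (w :: ws) i = pvAdv t.2 ws (i + 1) := by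
        simp [pvAdv, hgt]
      simp only [pvLabs, hadv, pvCollL, pvColl, h2, if_false]
      rfl

lemma getLast?_cons_eq (a : Int) (L : List Int) :
    (a :: L).getLast? = some (L.getLast?.getD a) := by
  cases L with
  | nil => simp
  | cons y ys =>
    obtain ⟨z, hz⟩ := Option.isSome_iff_exists.mp
      (by rw [List.getLast?_isSome]; simp : ((y :: ys).getLast?).isSome)
    simp [List.getLast?_cons_cons, hz]

lemma cons_getLast_getD (a : Int) (L : List Int) :
    (a :: L).getLast?.getD 0 = L.getLast?.getD a := by
  rw [getLast?_cons_eq]; rfl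

-- within one word, after the group has been opened at (a, b)
lemma foldB_within (w : Int × Int) (i : Int) :
    ∀ (rest : List (Int × Int)) (pnt : Int) (W R : List (Int × Int)) (a b : Int),
    List.foldl pvStep (pnt, i, W, R ++ [(a, b)]) (pvCollL w i rest pnt).2.2 =
      ((pvColl w rest pnt).2.1, i, W,
        R ++ [(a, ((pvColl w rest pnt).2.2.getLast?.map (· + 1)).getD b)]) := by
  intro rest
  induction rest with
  | nil => intro pnt W R a b; simp [pvCollL, pvColl]
  | cons t rest ih =>
    intro pnt W R a b
    simp only [pvCollL, pvColl]
    by_cases h2 : t.2 ≤ w.2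
    · by_cases h1 : t.1 ≥ w.1
      · simp only [h2, h1, if_true, List.foldl_cons]
        have hstep : pvStep (pnt, i, W, R ++ [(a, b)]) (some (i, w)) =
            (pnt + 1, i, W, R ++ [(a, pnt + 1)]) := by
          simp [pvStep]
        rw [hstep, ih, getLast?_cons_eq]
        rcases h : (pvColl w rest (pnt + 1)).2.2.getLast? with _ | x <;> simp
      · simp only [h2, h1, if_true, if_false, List.foldl_cons]
        have hstep : pvStep (pnt, i, W, R ++ [(a, b)]) none =
            (pnt + 1, i, W, R ++ [(a, b)]) := rfl
        rw [hstep, ih]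
    · simp [h2]

-- one whole word, entered with prev ≠ i
lemma foldB_word (w : Int × Int) (i : Int) :
    ∀ (rest : List (Int × Int)) (pnt prev : Int) (W R : List (Int × Int)), prev ≠ i →
    List.foldl pvStep (pnt, prev, W, R) (pvCollL w i rest pnt).2.2 =
      (match (pvColl w rest pnt).2.2 with
        | [] => ((pvColl w rest pnt).2.1, prev, W, R)
        | a :: L => ((pvColl w rest pnt).2.1, i, W ++ [w], R ++ [(a, L.getLast?.getD a + 1)])) := by
  intro rest
  induction rest with
  | nil => intro pnt prev W R _; simp [pvCollL, pvColl]
  | cons t rest ih =>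
    intro pnt prev W R hne
    simp only [pvCollL, pvColl]
    by_cases h2 : t.2 ≤ w.2
    · by_cases h1 : t.1 ≥ w.1
      · simp only [h2, h1, if_true, List.foldl_cons]
        have hbeq : (i == prev) = false := by
          simp; exact fun h => hne h.symm
        have hstep : pvStep (pnt, prev, W, R) (some (i, w)) =
            (pnt + 1, i, W ++ [w], R ++ [(pnt, pnt + 1)]) := by
          simp [pvStep, hbeq]
        rw [hstep, foldB_within w i rest (pnt + 1) (W ++ [w]) R pnt (pnt + 1)]
        have : ((pvColl w rest (pnt + 1)).2.2.getLast?.map (· + 1)).getD (pnt + 1) =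
            (pvColl w rest (pnt + 1)).2.2.getLast?.getD pnt + 1 := by
          rcases h : (pvColl w rest (pnt + 1)).2.2.getLast? with _ | x <;> simp
        rw [this]
      · simp only [h2, h1, if_true, if_false, List.foldl_cons]
        have hstep : pvStep (pnt, prev, W, R) none = (pnt + 1, prev, W, R) := rfl
        rw [hstep, ih _ _ _ _ hne]
    · simp [h2]

-- the whole pass-2 fold, over the full label stream
lemma foldB_all :
    ∀ (wsS rest : List (Int × Int)) (pnt i prev : Int) (W R : List (Int × Int)), prev < i →
    ((List.foldl pvStep (pnt, prev, W, R) (pvLabs rest wsS i)).2.2.1 =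
      W ++ ((pvRef wsS rest pnt).filter (fun kv => !kv.2.isEmpty)).map (fun kv => kv.1)) ∧
    ((List.foldl pvStep (pnt, prev, W, R) (pvLabs rest wsS i)).2.2.2 =
      R ++ ((pvRef wsS rest pnt).filter (fun kv => !kv.2.isEmpty)).map pvOutPair) ∧
    (List.foldl pvStep (pnt, prev, W, R) (pvLabs rest wsS i)).1 = (pvEnd wsS rest pnt).2 ∧
    (List.foldl pvStep (pnt, prev, W, R) (pvLabs rest wsS i)).2.1 < i + (wsS.length : Int) := by
  intro wsS
  induction wsS with
  | nil =>
    intro rest pnt i prev W R hlt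
    rw [labs_nil]
    exact ⟨by simp [pvRef], by simp [pvRef], by simp [pvEnd], by simpa using hlt⟩
  | cons w ws ih =>
    intro rest pnt i prev W R hlt
    rw [labs_split w rest ws i pnt, List.foldl_append]
    rw [foldB_word w i rest pnt prev W R (by omega)]
    rcases h : (pvColl w rest pnt).2.2 with _ | ⟨a, L⟩
    · simp only
      have := ih (pvColl w rest pnt).1 (pvColl w rest pnt).2.1 (i + 1) prev W R (by omega)
      refine ⟨?_, ?_, ?_, ?_⟩
      · rw [this.1]; simp [pvRef, h]
      · rw [this.2.1]; simp [pvRef, h]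
      · rw [this.2.2.1]; simp [pvEnd]
      · have := this.2.2.2; simp only [List.length_cons]; push_cast; omega
    · simp only
      have := ih (pvColl w rest pnt).1 (pvColl w rest pnt).2.1 (i + 1) i
          (W ++ [w]) (R ++ [(a, L.getLast?.getD a + 1)]) (by omega)
      refine ⟨?_, ?_, ?_, ?_⟩
      · rw [this.1]; simp [pvRef, h]
      · rw [this.2.1]
        simp only [pvRef, h, List.filter_cons]
        have : pvOutPair (w, a :: L) = (a, L.getLast?.getD a + 1) := by
          simp [pvOutPair, cons_getLast_getD]
        simp [this]
      · rw [this.2.2.1]; simp [pvEnd]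
      · have := this.2.2.2; simp only [List.length_cons]; push_cast; omega

-- ===== VERDICT (by name: the statement is the Claim_ definition above) =====
theorem map_words_to_tokens_spec : Claim_equal_map_words_to_tokens := by
  intro toks words _ hpre
  unfold Spec_map_words_to_tokens map_words_to_tokens map_words_to_tokens_alt
      map_spans_to_spans_basic
  have hA := foldA_eq words toks 0 PySem.Dict.empty hpre
      (by intro w _; exact PySem.Dict.contains_empty w)
  have hB := foldB_all words toks 0 0 (-1) [] [] (by omega)
  dsimp only
  rw [hA.2.2, hB.1, hB.2.1]
  have hempty : (PySem.Dict.empty : PySem.Dict (Int × Int) (List Int)).items = [] := rfl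
  rw [hempty]
  simp only [List.nil_append]
  refine Prod.ext rfl ?_
  apply List.map_congr_left
  intro kv hkv
  have hne : kv.2 ≠ [] := by
    have := List.of_mem_filter hkv
    simpa [List.isEmpty_iff] using this
  rw [pyGet?_zero_eq_head?, PySem.List.pyGet?_neg_one]
  rfl
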